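-- pv_equiv track=rewrite | github.com/alexlux58/MyUtils | recon-framework/src/analyzers/attack_surface_analyzer.py | _identify_initial_access_vectors
-- ===== SOURCE A (Python) =====
-- from typing import Dict, List, Any, Optional
--
-- def _identify_initial_access_vectors(data: Dict[str, Any], attack_vectors: List[Dict]) -> List[str]:
--     """Identify initial access vectors for red team operations."""
--     initial_access = []
--
--     # Web-based initial access
--     web_vectors = [v for v in attack_vectors if v['vector_type'] == 'web_security']
--     if web_vectors:
--         initial_access.append('Web Application Exploitation')
--
--     # Vulnerability-based initial access
--     vuln_vectors = [v for v in attack_vectors if v['vector_type'] == 'vulnerability']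
--     if vuln_vectors:
--         initial_access.append('Vulnerability Exploitation')
--
--     # Social engineering initial access
--     se_vectors = [v for v in attack_vectors if v['vector_type'] == 'social_engineering']
--     if se_vectors:
--         initial_access.append('Social Engineering')
--
--     # Network-based initial access
--     network_vectors = [v for v in attack_vectors if v['vector_type'] == 'network_service']
--     if network_vectors:
--         initial_access.append('Network Service Exploitation')
--
--     # Email-based initial access
--     if 'digital_footprint' in data:
--         footprint_data = data['digital_footprint']
--         if footprint_data.get('identifier_type') == 'email':
--             initial_access.append('Email-based Attacks')
--
--     return initial_access
-- ===== SOURCE B (Python) =====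
-- def _identify_initial_access_vectors(data, attack_vectors):
--     """Single pass over attack_vectors maintaining four boolean flags
--     (one elif chain sets at most one flag per vector), then emit labels
--     in the fixed order, then the email branch."""
--     web = vuln = se = net = False
--     for v in attack_vectors:
--         t = v['vector_type']
--         if t == 'web_security':
--             web = True
--         elif t == 'vulnerability':
--             vuln = True
--         elif t == 'social_engineering':
--             se = True
--         elif t == 'network_service':
--             net = True
--     out = []
--     if web:
--         out.append('Web Application Exploitation')
--     if vuln:
--         out.append('Vulnerability Exploitation')
--     if se:
--         out.append('Social Engineering')
--     if net:
--         out.append('Network Service Exploitation')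
--     fp = data.get('digital_footprint')
--     if fp is not None and fp.get('identifier_type') == 'email':
--         out.append('Email-based Attacks')
--     return out
-- ===== Notes on version B (the rewrite author's own statement) =====
-- stated objective: alternative
-- what changed: B makes a single pass over attack_vectors accumulating four boolean presence flags in one elif chain, then emits the labels from the flags, instead of A's four separate list-comprehension scans each followed by an emptiness test.
import Mathlib
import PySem

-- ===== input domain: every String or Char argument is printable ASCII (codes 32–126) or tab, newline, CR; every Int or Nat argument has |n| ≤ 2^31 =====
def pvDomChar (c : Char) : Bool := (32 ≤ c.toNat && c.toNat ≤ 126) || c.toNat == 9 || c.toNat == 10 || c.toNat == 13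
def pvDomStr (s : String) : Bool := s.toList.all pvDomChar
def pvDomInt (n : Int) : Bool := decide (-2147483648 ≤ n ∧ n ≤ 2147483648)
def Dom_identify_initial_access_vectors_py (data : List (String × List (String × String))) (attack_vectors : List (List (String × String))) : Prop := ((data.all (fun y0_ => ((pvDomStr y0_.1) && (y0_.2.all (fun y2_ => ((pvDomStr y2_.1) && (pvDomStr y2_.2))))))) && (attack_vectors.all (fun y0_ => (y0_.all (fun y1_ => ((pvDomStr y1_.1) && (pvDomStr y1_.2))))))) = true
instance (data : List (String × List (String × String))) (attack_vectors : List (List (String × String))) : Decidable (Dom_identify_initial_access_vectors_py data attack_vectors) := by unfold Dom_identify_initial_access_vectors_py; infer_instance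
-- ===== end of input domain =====

-- B replaces A's four separate comprehension scans by ONE pass over attack_vectors that
-- accumulates four boolean presence flags in an elif chain, then emits the labels (objective: alternative).

-- ===== PORT A =====
-- literal transliteration: four filters, each followed by an emptiness test, then the email branch
def identify_initial_access_vectors_py (data : List (String × List (String × String))) (attack_vectors : List (List (String × String))) : List String :=
  let initial_access : List String := []
  let web_vectors := attack_vectors.filter (fun v => (PySem.Dict.mk v).get? "vector_type" == some "web_security")
  let initial_access := if web_vectors ≠ [] then initial_access ++ ["Web Application Exploitation"] else initial_access
  let vuln_vectors := attack_vectors.filter (fun v => (PySem.Dict.mk v).get? "vector_type" == some "vulnerability")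
  let initial_access := if vuln_vectors ≠ [] then initial_access ++ ["Vulnerability Exploitation"] else initial_access
  let se_vectors := attack_vectors.filter (fun v => (PySem.Dict.mk v).get? "vector_type" == some "social_engineering")
  let initial_access := if se_vectors ≠ [] then initial_access ++ ["Social Engineering"] else initial_access
  let network_vectors := attack_vectors.filter (fun v => (PySem.Dict.mk v).get? "vector_type" == some "network_service")
  let initial_access := if network_vectors ≠ [] then initial_access ++ ["Network Service Exploitation"] else initial_access
  let initial_access :=
    match (PySem.Dict.mk data).get? "digital_footprint" with
    | some footprint_data =>
        if (PySem.Dict.mk footprint_data).get? "identifier_type" == some "email"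
        then initial_access ++ ["Email-based Attacks"] else initial_access
    | none => initial_access
  initial_access

-- ===== PORT B =====
-- single fold accumulating four flags; the 'none' branch is the KeyError case Pre_ excludes
def identify_initial_access_vectors_py_alt (data : List (String × List (String × String))) (attack_vectors : List (List (String × String))) : List String :=
  let flags : Bool × Bool × Bool × Bool :=
    attack_vectors.foldl (fun fl v =>
      match (PySem.Dict.mk v).get? "vector_type" with
      | none => fl
      | some t =>
        if t = "web_security" then (true, fl.2.1, fl.2.2.1, fl.2.2.2)
        else if t = "vulnerability" then (fl.1, true, fl.2.2.1, fl.2.2.2)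
        else if t = "social_engineering" then (fl.1, fl.2.1, true, fl.2.2.2)
        else if t = "network_service" then (fl.1, fl.2.1, fl.2.2.1, true)
        else fl) (false, false, false, false)
  let out : List String := []
  let out := if flags.1 then out ++ ["Web Application Exploitation"] else out
  let out := if flags.2.1 then out ++ ["Vulnerability Exploitation"] else out
  let out := if flags.2.2.1 then out ++ ["Social Engineering"] else out
  let out := if flags.2.2.2 then out ++ ["Network Service Exploitation"] else out
  match (PySem.Dict.mk data).get? "digital_footprint" with
  | some fp =>
      if (PySem.Dict.mk fp).get? "identifier_type" == some "email"
      then out ++ ["Email-based Attacks"] else out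
  | none => out

-- ===== PRECONDITION & SPEC =====
-- Pre_ excludes exactly the inputs where Python A raises KeyError: a vector dict without the 'vector_type' key.
def Pre_identify_initial_access_vectors_py (data : List (String × List (String × String))) (attack_vectors : List (List (String × String))) : Prop :=
  ∀ v ∈ attack_vectors, "vector_type" ∈ v.map (·.1)
instance (data : List (String × List (String × String))) (attack_vectors : List (List (String × String))) : Decidable (Pre_identify_initial_access_vectors_py data attack_vectors) := by unfold Pre_identify_initial_access_vectors_py; infer_instance
def pvWitness_identify_initial_access_vectors_py : (List (String × List (String × String))) × (List (List (String × String))) :=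
  ([("digital_footprint", [("identifier_type", "email")])], [[("vector_type", "web_security")]])
def Spec_identify_initial_access_vectors_py (data : List (String × List (String × String))) (attack_vectors : List (List (String × String))) (out : List String) : Prop := out = identify_initial_access_vectors_py_alt data attack_vectors
instance (data : List (String × List (String × String))) (attack_vectors : List (List (String × String))) (out : List String) : Decidable (Spec_identify_initial_access_vectors_py data attack_vectors out) := by unfold Spec_identify_initial_access_vectors_py; infer_instance

-- ===== CLAIM (what is proved, stated in full; the proofs are below) =====
def Claim_equal_identify_initial_access_vectors_py : Prop := ∀ (data : List (String × List (String × String))) (attack_vectors : List (List (String × String))), Dom_identify_initial_access_vectors_py data attack_vectors → Pre_identify_initial_access_vectors_py data attack_vectors → Spec_identify_initial_access_vectors_py data attack_vectors (identify_initial_access_vectors_py data attack_vectors)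

-- ===== LEMMAS AND PROOFS =====

-- B's fold computes, in each component, the disjunction of the start flag with
-- 'some vector has that type'; the elif chain touches exactly one component per element.
lemma fold_flags (l : List (List (String × String))) (w x y z : Bool) :
    l.foldl (fun fl v =>
      match (PySem.Dict.mk v).get? "vector_type" with
      | none => fl
      | some t =>
        if t = "web_security" then (true, fl.2.1, fl.2.2.1, fl.2.2.2)
        else if t = "vulnerability" then (fl.1, true, fl.2.2.1, fl.2.2.2)
        else if t = "social_engineering" then (fl.1, fl.2.1, true, fl.2.2.2)
        else if t = "network_service" then (fl.1, fl.2.1, fl.2.2.1, true)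
        else fl) (w, x, y, z)
    = (w || l.any (fun v => (PySem.Dict.mk v).get? "vector_type" == some "web_security"),
       x || l.any (fun v => (PySem.Dict.mk v).get? "vector_type" == some "vulnerability"),
       y || l.any (fun v => (PySem.Dict.mk v).get? "vector_type" == some "social_engineering"),
       z || l.any (fun v => (PySem.Dict.mk v).get? "vector_type" == some "network_service")) := by
  induction l generalizing w x y z with
  | nil => simp
  | cons v tl ih =>
    simp only [List.foldl_cons, List.any_cons]
    cases h : (PySem.Dict.mk v).get? "vector_type" with
    | none => rw [ih]; simp
    | some t =>
      simp only [h]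
      split_ifs with h1 h2 h3 h4 <;> rw [ih] <;>
        first
        | simp [beq_eq_false_iff_ne.mpr h1, beq_eq_false_iff_ne.mpr h2,
                beq_eq_false_iff_ne.mpr h3, beq_eq_false_iff_ne.mpr h4]
        | simp [*]

-- A's emptiness test of a filter is B's any
lemma filter_ne_nil_iff_any (l : List (List (String × String))) (p : List (String × String) → Bool) :
    (l.filter p ≠ []) ↔ l.any p = true := by
  simp [List.filter_eq_nil_iff, List.any_eq_true]

-- ===== VERDICT (by name: the statement is the Claim_ definition above) =====
theorem identify_initial_access_vectors_py_spec : Claim_equal_identify_initial_access_vectors_py := by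
  intro data attack_vectors _ _
  unfold Spec_identify_initial_access_vectors_py identify_initial_access_vectors_py identify_initial_access_vectors_py_alt
  simp only [fold_flags, Bool.false_or, filter_ne_nil_iff_any]
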